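-- pv_equiv track=rewrite | github.com/mcnutty26/aoc | 2019/24/24.py | biodiversity
-- ===== SOURCE A (Python) =====
-- def biodiversity(g: list) -> int:
--     score = 0
--     inc = 1
--     for y in range(len(g)):
--         for x in range(len(g[0])):
--             score += g[y][x] * inc
--             inc *= 2
--     return score
-- ===== SOURCE B (Python) =====
-- def biodiversity(g: list) -> int:
--     score = 0
--     for row in reversed(g):
--         for x in reversed(range(len(g[0]))):
--             score = score * 2 + row[x]
--     return score
-- ===== Notes on version B (the rewrite author's own statement) =====
-- stated objective: alternative
-- what changed: Replaces the running power-of-two 'inc' accumulator over index-based nested loops with Horner's method: a single reverse row-major traversal updating score = score*2 + cell.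
import Mathlib
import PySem

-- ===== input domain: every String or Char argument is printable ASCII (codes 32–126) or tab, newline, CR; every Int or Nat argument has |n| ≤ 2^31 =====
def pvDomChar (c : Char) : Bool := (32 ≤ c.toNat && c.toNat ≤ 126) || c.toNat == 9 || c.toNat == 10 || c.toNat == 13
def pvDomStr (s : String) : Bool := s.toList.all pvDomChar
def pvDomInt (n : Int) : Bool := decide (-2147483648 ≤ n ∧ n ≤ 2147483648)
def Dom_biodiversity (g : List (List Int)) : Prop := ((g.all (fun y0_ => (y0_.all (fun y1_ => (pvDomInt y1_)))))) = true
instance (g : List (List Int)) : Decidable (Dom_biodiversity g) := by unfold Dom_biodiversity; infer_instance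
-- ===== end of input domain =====

-- B replaces A's running power-of-two multiplier with Horner's method over a reverse
-- row-major traversal (alternative decomposition, same cost).

-- ===== PORT A =====
-- A: nested index loops, state (score, inc), score += g[y][x]*inc; inc *= 2.
def biodiversity (g : List (List Int)) : Int :=
  ((PySem.List.pyRange 0 (PySem.List.len g) 1).foldl
    (fun (st : Int × Int) y =>
      (PySem.List.pyRange 0 (PySem.List.len (PySem.List.pyGetD g 0 [])) 1).foldl
        (fun (st : Int × Int) x =>
          (st.1 + PySem.List.pyGetD (PySem.List.pyGetD g y []) x 0 * st.2, st.2 * 2))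
        st)
    ((0 : Int), (1 : Int))).1

-- ===== PORT B =====
-- B: for row in reversed(g): for x in reversed(range(len(g[0]))): score = score*2 + row[x]
def biodiversity_alt (g : List (List Int)) : Int :=
  g.reverse.foldl
    (fun (score : Int) row =>
      (PySem.List.pyRange 0 (PySem.List.len (PySem.List.pyGetD g 0 [])) 1).reverse.foldl
        (fun (s : Int) x => s * 2 + PySem.List.pyGetD row x 0)
        score)
    0

-- ===== PRECONDITION & SPEC =====
-- Pre_ excludes exactly the ragged grids where a row is shorter than the first row:
-- there Python A raises IndexError on g[y][x].
def Pre_biodiversity (g : List (List Int)) : Prop :=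
  ∀ r ∈ g, (g.headD []).length ≤ r.length
instance (g : List (List Int)) : Decidable (Pre_biodiversity g) := by
  unfold Pre_biodiversity; infer_instance

def pvWitness_biodiversity : List (List Int) := [[1, 0], [0, 1]]

def Spec_biodiversity (g : List (List Int)) (out : Int) : Prop := out = biodiversity_alt g
instance (g : List (List Int)) (out : Int) : Decidable (Spec_biodiversity g out) := by
  unfold Spec_biodiversity; infer_instance

-- ===== CLAIM (what is proved, stated in full; the proofs are below) =====
def Claim_equal_biodiversity : Prop :=
  ∀ (g : List (List Int)), Dom_biodiversity g → Pre_biodiversity g →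
    Spec_biodiversity g (biodiversity g)

-- ===== LEMMAS AND PROOFS =====

-- Reference value: Horner value of a row (LSB first) and of a grid of width w.
def pvRowval (r : List Int) : Int :=
  match r with
  | [] => 0
  | a :: t => a + 2 * pvRowval t

def pvGridval (w : Nat) (rows : List (List Int)) : Int :=
  match rows with
  | [] => 0
  | r :: rs => pvRowval (r.take w) + 2 ^ w * pvGridval w rs

theorem pvRowval_append_singleton (l : List Int) (a : Int) :
    pvRowval (l ++ [a]) = pvRowval l + a * 2 ^ l.length := by
  induction l with
  | nil => simp [pvRowval]
  | cons b t ih => simp [pvRowval, ih]; ring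

theorem pv_take_succ (r : List Int) (w : Nat) (h : w < r.length) :
    r.take (w + 1) = r.take w ++ [r[w]] := by
  rw [List.take_add_one, List.getElem?_eq_getElem h]
  rfl

theorem pvInnerA (r : List Int) (w : Nat) (h : w ≤ r.length) (s inc : Int) :
    (PySem.List.pyRange 0 (w : Int) 1).foldl
      (fun (st : Int × Int) x => (st.1 + PySem.List.pyGetD r x 0 * st.2, st.2 * 2)) (s, inc)
    = (s + inc * pvRowval (r.take w), inc * 2 ^ w) := by
  induction w generalizing s inc with
  | zero => simp [PySem.List.pyRange_one_eq_nil, pvRowval]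
  | succ n ih =>
    have hrange : PySem.List.pyRange 0 ((n + 1 : Nat) : Int) 1
        = PySem.List.pyRange 0 (n : Int) 1 ++ [(n : Int)] := by
      have := PySem.List.pyRange_one_succ_right (a := 0) (b := (n : Int)) (by positivity)
      simpa [Nat.cast_add] using this
    have hn : n < r.length := by omega
    rw [hrange, List.foldl_append, ih (by omega)]
    simp only [List.foldl_cons, List.foldl_nil]
    have hg : PySem.List.pyGetD r ((n : Nat) : Int) 0 = r[n] := by
      simp [List.getD, List.getElem?_eq_getElem hn]
    rw [hg, pv_take_succ r n hn, pvRowval_append_singleton]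
    have hl : (r.take n).length = n := by simp [Nat.min_eq_left (le_of_lt hn)]
    rw [hl]
    simp only [Prod.mk.injEq]
    constructor <;> ring

theorem pvInnerB (r : List Int) (w : Nat) (h : w ≤ r.length) (s : Int) :
    (PySem.List.pyRange 0 (w : Int) 1).reverse.foldl
      (fun (s : Int) x => s * 2 + PySem.List.pyGetD r x 0) s
    = s * 2 ^ w + pvRowval (r.take w) := by
  induction w generalizing s with
  | zero => simp [PySem.List.pyRange_one_eq_nil, pvRowval]
  | succ n ih =>
    have hrange : PySem.List.pyRange 0 ((n + 1 : Nat) : Int) 1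
        = PySem.List.pyRange 0 (n : Int) 1 ++ [(n : Int)] := by
      have := PySem.List.pyRange_one_succ_right (a := 0) (b := (n : Int)) (by positivity)
      simpa [Nat.cast_add] using this
    have hn : n < r.length := by omega
    rw [hrange]
    simp only [List.reverse_append, List.reverse_singleton, List.singleton_append,
      List.foldl_cons]
    rw [ih (by omega)]
    have hg : PySem.List.pyGetD r ((n : Nat) : Int) 0 = r[n] := by
      simp [List.getD, List.getElem?_eq_getElem hn]
    rw [hg, pv_take_succ r n hn, pvRowval_append_singleton]
    have hl : (r.take n).length = n := by simp [Nat.min_eq_left (le_of_lt hn)]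
    rw [hl]
    ring

theorem pvOuterA (w : Nat) (rows : List (List Int)) (h : ∀ r ∈ rows, w ≤ r.length)
    (s inc : Int) :
    rows.foldl
      (fun (st : Int × Int) r =>
        (PySem.List.pyRange 0 (w : Int) 1).foldl
          (fun (st : Int × Int) x => (st.1 + PySem.List.pyGetD r x 0 * st.2, st.2 * 2)) st)
      (s, inc)
    = (s + inc * pvGridval w rows, inc * 2 ^ (w * rows.length)) := by
  induction rows generalizing s inc with
  | nil => simp [pvGridval]
  | cons r rs ih =>
    simp only [List.foldl_cons]
    rw [pvInnerA r w (h r (by simp)) s inc, ih (fun q hq => h q (by simp [hq]))]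
    simp only [pvGridval, List.length_cons, Nat.mul_succ, pow_add, Prod.mk.injEq]
    constructor <;> ring

theorem pvOuterB (w : Nat) (rows : List (List Int)) (h : ∀ r ∈ rows, w ≤ r.length)
    (s : Int) :
    rows.reverse.foldl
      (fun (score : Int) row =>
        (PySem.List.pyRange 0 (w : Int) 1).reverse.foldl
          (fun (s : Int) x => s * 2 + PySem.List.pyGetD row x 0) score)
      s
    = s * 2 ^ (w * rows.length) + pvGridval w rows := by
  induction rows generalizing s with
  | nil => simp [pvGridval]
  | cons r rs ih =>
    simp only [List.reverse_cons, List.foldl_append, List.foldl_cons, List.foldl_nil]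
    rw [ih (fun q hq => h q (by simp [hq]))]
    rw [pvInnerB r w (h r (by simp))]
    simp only [pvGridval, List.length_cons, Nat.mul_succ, pow_add]
    ring

-- ===== VERDICT (by name: the statement is the Claim_ definition above) =====
theorem biodiversity_spec : Claim_equal_biodiversity := by
  intro g _ hpre
  unfold Spec_biodiversity biodiversity biodiversity_alt
  have hw : PySem.List.pyGetD g 0 [] = g.headD [] := by
    cases g <;> simp [PySem.List.pyGetD_zero, List.getD]
  set w := (g.headD []).length with hwdef
  have hrows : ∀ r ∈ g, w ≤ r.length := hpre
  have hA := PySem.List.foldl_pyRange_zero_pyGetD' (xs := g) (d := ([] : List Int))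
    (f := fun (st : Int × Int) r =>
      (PySem.List.pyRange 0 (w : Int) 1).foldl
        (fun (st : Int × Int) x => (st.1 + PySem.List.pyGetD r x 0 * st.2, st.2 * 2)) st)
    (init := ((0 : Int), (1 : Int)))
  simp only [PySem.List.len_eq, hw, ← hwdef] at *
  rw [hA, pvOuterA w g hrows 0 1, pvOuterB w g hrows 0]
  simp
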